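-- pv_equiv track=rewrite | github.com/AssertLang/AssertLang | tests/test_no_unknown.py | check_for_unknown
-- ===== SOURCE A (Python) =====
-- def check_for_unknown(code: str, language: str) -> tuple[bool, list[str]]:
--     """Check if code contains unknown/placeholder patterns."""
--     issues = []
--
--     # Check for various unknown patterns
--     patterns = [
--         "<unknown>",
--         "/* unknown",
--         "/* Unknown",
--         "// Unknown statement",
--         "// unknown",
--         "/* multi-statement",  # Incomplete lambdas
--     ]
--
--     for pattern in patterns:
--         if pattern in code:
--             # Find line numbers
--             lines = code.split('\n')
--             for i, line in enumerate(lines, 1):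
--                 if pattern in line:
--                     issues.append(f"Line {i}: {line.strip()}")
--
--     return len(issues) == 0, issues
-- ===== SOURCE B (Python) =====
-- def check_for_unknown(code: str, language: str) -> tuple[bool, list[str]]:
--     """Check if code contains unknown/placeholder patterns."""
--     patterns = [
--         "<unknown>",
--         "/* unknown",
--         "/* Unknown",
--         "// Unknown statement",
--         "// unknown",
--         "/* multi-statement",
--     ]
--     # patterns contain no newline, so a whole-text membership test is a
--     # sound prefilter; then one pass over the lines fills per-pattern buckets
--     present = [p for p in patterns if p in code]
--     buckets = {p: [] for p in present}
--     for i, line in enumerate(code.split('\n'), 1):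
--         for p in present:
--             if p in line:
--                 buckets[p].append(f"Line {i}: {line.strip()}")
--     issues = []
--     for p in present:
--         issues.extend(buckets[p])
--     return len(issues) == 0, issues
-- ===== Notes on version B (the rewrite author's own statement) =====
-- stated objective: alternative
-- what changed: B splits the code into lines once and makes a single enumerated pass over them, appending matches into per-pattern buckets (a dict), then concatenates the buckets in pattern order; A re-splits the code and rescans all lines separately for every pattern found in the whole text.
import Mathlib
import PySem

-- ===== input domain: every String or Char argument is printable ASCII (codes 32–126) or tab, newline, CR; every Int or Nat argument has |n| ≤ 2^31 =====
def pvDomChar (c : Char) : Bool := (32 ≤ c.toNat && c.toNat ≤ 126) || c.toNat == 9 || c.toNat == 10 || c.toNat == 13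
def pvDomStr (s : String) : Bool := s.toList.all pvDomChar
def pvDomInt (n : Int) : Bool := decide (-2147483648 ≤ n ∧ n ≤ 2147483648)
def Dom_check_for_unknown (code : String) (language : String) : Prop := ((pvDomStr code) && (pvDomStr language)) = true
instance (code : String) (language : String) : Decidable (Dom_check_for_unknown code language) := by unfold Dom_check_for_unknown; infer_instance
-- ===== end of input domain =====

-- B restructures A: the code is split into lines ONCE and a single enumerated pass fills
-- per-pattern buckets (a dict), concatenated in pattern order at the end (objective: alternative).

-- the fixed pattern list (shared literal of both programs)
def pvPatterns : List String :=
  ["<unknown>", "/* unknown", "/* Unknown", "// Unknown statement", "// unknown", "/* multi-statement"]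

-- f"Line {i}: {line.strip()}" (shared formatting expression of both programs)
def pvFmt (i : Int) (line : List Char) : String :=
  String.ofList ("Line ".toList ++ PySem.Int.toChars i ++ ": ".toList ++ PySem.Chars.strip line)

-- ===== PORT A =====
def check_for_unknown (code : String) (language : String) : Bool × List String :=
  let issues : List String :=
    pvPatterns.foldl (fun issues pattern =>
      if PySem.Str.isIn pattern code then
        -- lines = code.split('\n')  (recomputed for each matching pattern, as in A)
        let lines : List (List Char) := PySem.Chars.splitOn code.toList ['\n']
        (PySem.List.enumerate lines 1).foldl
          (fun issues il =>
            if PySem.Chars.isIn pattern.toList il.2 then issues ++ [pvFmt il.1 il.2] else issues)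
          issues
      else issues) []
  (issues.length == 0, issues)

-- ===== PORT B =====
def check_for_unknown_alt (code : String) (language : String) : Bool × List String :=
  let present : List String := pvPatterns.filter (fun p => PySem.Str.isIn p code)
  let buckets0 : PySem.Dict String (List String) :=
    present.foldl (fun d p => d.insert p []) PySem.Dict.empty
  let lines : List (List Char) := PySem.Chars.splitOn code.toList ['\n']
  let buckets : PySem.Dict String (List String) :=
    (PySem.List.enumerate lines 1).foldl
      (fun d il =>
        present.foldl (fun d p =>
          if PySem.Chars.isIn p.toList il.2 then d.modify p [] (· ++ [pvFmt il.1 il.2]) else d) d)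
      buckets0
  let issues : List String := present.foldl (fun acc p => acc ++ buckets.getD p []) []
  (issues.length == 0, issues)

-- ===== PRECONDITION & SPEC =====
def Spec_check_for_unknown (code : String) (language : String) (out : Bool × List String) : Prop := out = check_for_unknown_alt code language
instance (code : String) (language : String) (out : Bool × List String) : Decidable (Spec_check_for_unknown code language out) := by unfold Spec_check_for_unknown; infer_instance

-- ===== CLAIM (what is proved, stated in full; the proofs are below) =====
def Claim_equal_check_for_unknown : Prop := ∀ (code : String) (language : String), Dom_check_for_unknown code language → Spec_check_for_unknown code language (check_for_unknown code language)

-- ===== LEMMAS AND PROOFS =====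

-- a per-line bucket pass leaves keys outside ps untouched
theorem pv_lineFold_not_mem (ps : List String) (line : List Char) (v : String)
    (d : PySem.Dict String (List String)) (q : String) (hq : q ∉ ps) :
    (ps.foldl (fun d p =>
        if PySem.Chars.isIn p.toList line then d.modify p [] (· ++ [v]) else d) d).getD q []
      = d.getD q [] := by
  induction ps generalizing d with
  | nil => rfl
  | cons p t ih =>
    simp only [List.foldl_cons]
    rw [ih _ (fun h => hq (List.mem_cons_of_mem _ h))]
    split
    · exact PySem.Dict.getD_modify_of_ne _ _ _ (fun h => hq (h ▸ List.mem_cons_self))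
    · rfl

-- a per-line bucket pass appends [v] to exactly the buckets of matching patterns
theorem pv_lineFold_mem (ps : List String) (hnd : ps.Nodup) (line : List Char) (v : String)
    (d : PySem.Dict String (List String)) (q : String) (hq : q ∈ ps) :
    (ps.foldl (fun d p =>
        if PySem.Chars.isIn p.toList line then d.modify p [] (· ++ [v]) else d) d).getD q []
      = d.getD q [] ++ (if PySem.Chars.isIn q.toList line then [v] else []) := by
  induction ps generalizing d with
  | nil => cases hq
  | cons p t ih =>
    simp only [List.foldl_cons]
    rcases List.mem_cons.mp hq with rfl | hqt
    · rw [pv_lineFold_not_mem t line v _ q (List.nodup_cons.mp hnd).1]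
      split
      · rw [PySem.Dict.getD_modify_self]
      · simp
    · have hne : q ≠ p := fun h => (List.nodup_cons.mp hnd).1 (h ▸ hqt)
      rw [ih (List.nodup_cons.mp hnd).2 _ hqt]
      congr 1
      split
      · exact PySem.Dict.getD_modify_of_ne _ _ _ hne
      · rfl

-- the whole single pass: each present bucket ends as the matches of its pattern, in line order
theorem pv_pass (present : List String) (hnd : present.Nodup) (E : List (Int × List Char))
    (d : PySem.Dict String (List String)) (q : String) (hq : q ∈ present) :
    (E.foldl (fun d il =>
        present.foldl (fun d p =>
          if PySem.Chars.isIn p.toList il.2 then d.modify p [] (· ++ [pvFmt il.1 il.2]) else d) d)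
        d).getD q []
      = d.getD q []
        ++ (E.filter (fun il => PySem.Chars.isIn q.toList il.2)).map (fun il => pvFmt il.1 il.2) := by
  induction E generalizing d with
  | nil => simp
  | cons e t ih =>
    simp only [List.foldl_cons, List.filter_cons]
    rw [ih _, pv_lineFold_mem present hnd e.2 (pvFmt e.1 e.2) d q hq]
    split <;> simp

-- initializing every bucket to [] leaves each lookup-with-default-[] equal to []
theorem pv_init (ps : List String) (d : PySem.Dict String (List String)) (q : String)
    (h : d.getD q [] = []) :
    (ps.foldl (fun d p => d.insert p []) d).getD q [] = [] := by
  induction ps generalizing d with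
  | nil => exact h
  | cons p t ih =>
    simp only [List.foldl_cons]
    apply ih
    rw [PySem.Dict.getD_insert]
    split <;> simp [h]

-- concatenating guarded blocks = concatenating the blocks of the passing elements
theorem pv_flatMap_if {α β : Type} (l : List α) (c : α → Bool) (f : α → List β) :
    l.flatMap (fun x => if c x then f x else []) = (l.filter c).flatMap f := by
  induction l with
  | nil => rfl
  | cons x t ih =>
    simp only [List.flatMap_cons, List.filter_cons]
    split <;> simp [ih]

-- ===== VERDICT (by name: the statement is the Claim_ definition above) =====
theorem check_for_unknown_spec : Claim_equal_check_for_unknown := by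
  intro code language _
  unfold Spec_check_for_unknown check_for_unknown check_for_unknown_alt
  simp only []
  set present : List String := pvPatterns.filter (fun p => PySem.Str.isIn p code) with hpres
  have hnd : present.Nodup := (by decide : pvPatterns.Nodup).filter _
  set E : List (Int × List Char) :=
    PySem.List.enumerate (PySem.Chars.splitOn code.toList ['\n']) 1 with hE
  set M : String → List String :=
    fun q => (E.filter (fun il => PySem.Chars.isIn q.toList il.2)).map (fun il => pvFmt il.1 il.2)
    with hM
  have hstep : ∀ (acc : List String), ∀ p ∈ pvPatterns,
      (if PySem.Str.isIn p code then
        E.foldl (fun issues il =>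
          if PySem.Chars.isIn p.toList il.2 then issues ++ [pvFmt il.1 il.2] else issues) acc
      else acc)
      = acc ++ (if PySem.Str.isIn p code then M p else []) := by
    intro acc p _
    split
    · simp only [hM]
      exact PySem.List.foldl_append_if (fun il : Int × List Char => PySem.Chars.isIn p.toList il.2)
        (fun il : Int × List Char => pvFmt il.1 il.2) E acc
    · simp
  have hA : pvPatterns.foldl (fun issues pattern =>
      if PySem.Str.isIn pattern code then
        E.foldl (fun issues il =>
          if PySem.Chars.isIn pattern.toList il.2 then issues ++ [pvFmt il.1 il.2] else issues)
          issues
      else issues) []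
      = pvPatterns.flatMap (fun p => if PySem.Str.isIn p code then M p else []) := by
    rw [PySem.List.foldl_congr_mem pvPatterns _
      (fun acc p => acc ++ (if PySem.Str.isIn p code then M p else [])) [] hstep]
    rw [PySem.List.foldl_append_eq_flatMap]
    simp
  have hB : present.foldl (fun acc p =>
      acc ++ (E.foldl (fun d il =>
          present.foldl (fun d p =>
            if PySem.Chars.isIn p.toList il.2 then d.modify p [] (· ++ [pvFmt il.1 il.2]) else d) d)
          (present.foldl (fun d p => d.insert p []) PySem.Dict.empty)).getD p []) []
      = present.flatMap M := by
    rw [PySem.List.foldl_append_eq_flatMap]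
    simp only [List.nil_append]
    apply List.flatMap_congr
    intro p hp
    rw [pv_pass present hnd E _ p hp, pv_init present PySem.Dict.empty p (by rfl)]
    simp [hM]
  have hiss : (pvPatterns.flatMap (fun p => if PySem.Str.isIn p code then M p else []))
      = present.flatMap M := pv_flatMap_if pvPatterns _ M
  rw [hA, hB, hiss]
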